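-- pv_equiv track=rewrite | github.com/lurf21/NextEditPrediction | data/data_processing.py | edit_chunk_num
-- ===== SOURCE A (Python) =====
-- def edit_chunk_num(diff_content):
--     """
--     Filters out entries in a diff that contain only one edit chunk.
--
--     :param diff_content: str, content of the diff
--     :return: bool, True if the diff has only one edit chunk, False otherwise
--     """
--     lines = diff_content.split('\n')
--     lines = lines[2:]
--
--     edit_chunks = 0
--     in_edit_chunk = False
--
--     for line in lines:
--         if line.startswith('+') or line.startswith('-'):
--             if not in_edit_chunk:
--                 edit_chunks += 1
--                 in_edit_chunk = True
--         else:
--             in_edit_chunk = False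
--
--     return edit_chunks != 1
-- ===== SOURCE B (Python) =====
-- def edit_chunk_num(diff_content):
--     lines = diff_content.split('\n')[2:]
--     marks = ''.join('+' if line.startswith(('+', '-')) else ' ' for line in lines)
--     return len(marks.split()) != 1
-- ===== Notes on version B (the rewrite author's own statement) =====
-- stated objective: idiomatic
-- what changed: Instead of scanning with an in_edit_chunk flag and counting rising edges, B renders each post-header line to a single mark character ('+' for edit lines, ' ' otherwise) and lets str.split() on the mark string form the maximal edit runs, returning len(marks.split()) != 1.
import Mathlib
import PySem

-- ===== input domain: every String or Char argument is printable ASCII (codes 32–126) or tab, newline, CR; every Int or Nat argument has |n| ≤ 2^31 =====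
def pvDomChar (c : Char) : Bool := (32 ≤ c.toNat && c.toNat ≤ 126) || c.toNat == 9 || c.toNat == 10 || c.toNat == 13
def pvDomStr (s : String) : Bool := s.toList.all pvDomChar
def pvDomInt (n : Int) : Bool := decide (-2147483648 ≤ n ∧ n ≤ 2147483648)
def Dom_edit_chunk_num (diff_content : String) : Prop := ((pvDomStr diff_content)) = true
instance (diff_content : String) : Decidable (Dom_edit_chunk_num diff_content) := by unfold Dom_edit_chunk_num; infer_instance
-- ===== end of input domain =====

-- B renders each line to a mark character and delegates run-counting to str.split(); idiomatic, same cost.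

-- ===== PORT A =====
def edit_chunk_num (diff_content : String) : Bool :=
  let lines := PySem.Chars.splitOn diff_content.toList ['\n']
  let lines := PySem.List.slice lines (some 2) none
  let st := lines.foldl
    (fun (s : Nat × Bool) line =>
      if PySem.Chars.startswith line ['+'] || PySem.Chars.startswith line ['-'] then
        if !s.2 then (s.1 + 1, true) else s
      else (s.1, false))
    (0, false)
  decide (st.1 ≠ 1)

-- ===== PORT B =====
def edit_chunk_num_alt (diff_content : String) : Bool :=
  let lines := PySem.List.slice (PySem.Chars.splitOn diff_content.toList ['\n']) (some 2) none
  let marks := PySem.Chars.join [] (lines.map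
    (fun line => if PySem.Chars.startswith line ['+'] || PySem.Chars.startswith line ['-']
                 then ['+'] else [' ']))
  decide ((PySem.Chars.split₀ marks).length ≠ 1)

-- ===== PRECONDITION & SPEC =====
def Spec_edit_chunk_num (diff_content : String) (out : Bool) : Prop := out = edit_chunk_num_alt diff_content
instance (diff_content : String) (out : Bool) : Decidable (Spec_edit_chunk_num diff_content out) := by unfold Spec_edit_chunk_num; infer_instance

-- ===== CLAIM (what is proved, stated in full; the proofs are below) =====
def Claim_equal_edit_chunk_num : Prop := ∀ (diff_content : String), Dom_edit_chunk_num diff_content → Spec_edit_chunk_num diff_content (edit_chunk_num diff_content)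

-- ===== LEMMAS AND PROOFS =====

-- A's loop state transition, on the Boolean per-line classification
def pvStep (s : Nat × Bool) (b : Bool) : Nat × Bool :=
  if b then (if !s.2 then (s.1 + 1, true) else s) else (s.1, false)

-- rising edges of bs, given the previous flag p
def pvRuns (p : Bool) : List Bool → Nat
  | [] => 0
  | b :: rest => (if b && !p then 1 else 0) + pvRuns b rest

-- B's mark string, on the Boolean per-line classification
def pvMarks (bs : List Bool) : List Char :=
  (bs.map (fun b => if b then ['+'] else [' '])).flatten

theorem pvFold_eq_runs (bs : List Bool) : ∀ (c : Nat) (p : Bool),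
    (bs.foldl pvStep (c, p)).1 = c + pvRuns p bs := by
  induction bs with
  | nil => intro c p; simp [pvRuns]
  | cons b rest ih =>
    intro c p
    simp only [List.foldl_cons, pvStep, pvRuns]
    cases b <;> cases p <;> simp [ih]
    omega

theorem pvGo_marks (bs : List Bool) : ∀ (acc : List (List Char)),
    (PySem.Chars.split₀.go (pvMarks bs) [] acc).length = acc.length + pvRuns false bs
    ∧ ∀ (c : Char) (cur : List Char),
        (PySem.Chars.split₀.go (pvMarks bs) (c :: cur) acc).length
          = acc.length + 1 + pvRuns true bs := by
  induction bs with
  | nil =>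
    intro acc
    constructor
    · simp [pvMarks, PySem.Chars.split₀.go, pvRuns]
    · intro c cur; simp [pvMarks, PySem.Chars.split₀.go, pvRuns]
  | cons b rest ih =>
    intro acc
    constructor
    · cases b with
      | true =>
        simp only [pvMarks, List.map_cons, List.flatten_cons, if_true]
        have := (ih acc).2 '+' []
        simpa [PySem.Chars.split₀.go, PySem.Chars.isspace, pvRuns, pvMarks,
          Nat.add_assoc] using this
      | false =>
        simp only [pvMarks, List.map_cons, List.flatten_cons]
        have := (ih acc).1
        simpa [PySem.Chars.split₀.go, PySem.Chars.isspace, pvRuns, pvMarks] using this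
    · intro c cur
      cases b with
      | true =>
        simp only [pvMarks, List.map_cons, List.flatten_cons, if_true]
        have := (ih acc).2 '+' (c :: cur)
        simpa [PySem.Chars.split₀.go, PySem.Chars.isspace, pvRuns, pvMarks] using this
      | false =>
        simp only [pvMarks, List.map_cons, List.flatten_cons]
        have := (ih ((c :: cur).reverse :: acc)).1
        simpa [PySem.Chars.split₀.go, PySem.Chars.isspace, pvRuns, pvMarks,
          Nat.add_assoc] using this

theorem pvSplit_marks (bs : List Bool) :
    (PySem.Chars.split₀ (pvMarks bs)).length = pvRuns false bs := by
  have := (pvGo_marks bs []).1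
  simpa [PySem.Chars.split₀] using this

theorem pvIntercalate_nil {α : Type} (l : List (List α)) :
    List.intercalate ([] : List α) l = l.flatten := by
  induction l with
  | nil => simp [List.intercalate]
  | cons x xs ih =>
    cases xs with
    | nil => simp [List.intercalate]
    | cons y ys =>
      simp only [List.intercalate, List.intersperse] at *
      simp_all

theorem pvMain (ls : List (List Char)) :
    (ls.foldl
      (fun (s : Nat × Bool) line =>
        if PySem.Chars.startswith line ['+'] || PySem.Chars.startswith line ['-'] then
          if !s.2 then (s.1 + 1, true) else s
        else (s.1, false)) (0, false)).1
    = (PySem.Chars.split₀ (PySem.Chars.join [] (ls.map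
        (fun line => if PySem.Chars.startswith line ['+'] || PySem.Chars.startswith line ['-']
                     then ['+'] else [' '])))).length := by
  have hjoin : PySem.Chars.join [] (ls.map
      (fun line => if PySem.Chars.startswith line ['+'] || PySem.Chars.startswith line ['-']
                   then ['+'] else [' ']))
      = pvMarks (ls.map
        (fun line => PySem.Chars.startswith line ['+'] || PySem.Chars.startswith line ['-'])) := by
    rw [PySem.Chars.join, pvIntercalate_nil]
    unfold pvMarks
    rw [List.map_map]
    rfl
  rw [hjoin,
    show (fun (s : Nat × Bool) line =>
        if PySem.Chars.startswith line ['+'] || PySem.Chars.startswith line ['-'] then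
          if !s.2 then (s.1 + 1, true) else s
        else (s.1, false))
      = (fun (s : Nat × Bool) line => pvStep s
          (PySem.Chars.startswith line ['+'] || PySem.Chars.startswith line ['-'])) from rfl,
    ← List.foldl_map, pvFold_eq_runs, pvSplit_marks, Nat.zero_add]

-- ===== VERDICT (by name: the statement is the Claim_ definition above) =====
theorem edit_chunk_num_spec : Claim_equal_edit_chunk_num := by
  intro d _
  unfold Spec_edit_chunk_num edit_chunk_num edit_chunk_num_alt
  simp only [pvMain]
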